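-- pv_equiv track=rewrite | github.com/HWBroker/Info_UPC_N10 | S11/5_semiordenat/lib.py | semiordenat
-- ===== SOURCE A (Python) =====
-- def semiordenat(v):
--     if len(v) > 0:
--         v1 = []
--         v2 = []
--
--         for i in v:
--             if i % 2 == 0:
--                 v1.append(i)
--             else:
--                 v2.append(i)
--
--         v1s = v1.copy()
--         v2s = v2.copy()
--         v1s.sort()
--         v2s.sort()
--
--         return v1 == v1s and v2 == v2s
-- ===== SOURCE B (Python) =====
-- def semiordenat(v):
--     if not v:
--         return None
--     last_even = None
--     last_odd = None
--     for x in v: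
--         if x % 2 == 0:
--             if last_even is not None and x < last_even:
--                 return False
--             last_even = x
--         else:
--             if last_odd is not None and x < last_odd:
--                 return False
--             last_odd = x
--     return True
-- ===== Notes on version B (the rewrite author's own statement) =====
-- stated objective: faster
-- what changed: Replaces the partition-copy-sort-compare (two sorts) with a single linear pass tracking the last even and last odd value, returning False at the first out-of-order element.
import Mathlib
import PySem

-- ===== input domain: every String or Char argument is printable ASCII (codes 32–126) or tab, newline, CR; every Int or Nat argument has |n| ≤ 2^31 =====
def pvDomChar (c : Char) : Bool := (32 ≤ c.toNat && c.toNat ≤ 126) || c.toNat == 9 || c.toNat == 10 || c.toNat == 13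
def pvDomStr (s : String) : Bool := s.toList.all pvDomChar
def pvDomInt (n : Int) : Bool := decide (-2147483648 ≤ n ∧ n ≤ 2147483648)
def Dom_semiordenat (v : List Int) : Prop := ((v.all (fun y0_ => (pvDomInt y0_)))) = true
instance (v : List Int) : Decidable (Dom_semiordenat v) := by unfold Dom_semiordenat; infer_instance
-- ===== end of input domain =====

-- B replaces A's partition + two sorts + list comparison with one linear pass tracking
-- the last even and last odd value (asymptotically faster: O(n) vs O(n log n)).

-- ===== PORT A =====
def semiordenat (v : List Int) : Option Bool :=
  if v.length > 0 then
    -- the for-loop appending each i to v1 (even) or v2 (odd)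
    let p := v.foldl
      (fun (acc : List Int × List Int) i =>
        if PySem.Int.mod i 2 == 0 then (acc.1 ++ [i], acc.2) else (acc.1, acc.2 ++ [i]))
      ([], [])
    let v1 := p.1
    let v2 := p.2
    let v1s := PySem.List.sorted v1 (fun x => x) false
    let v2s := PySem.List.sorted v2 (fun x => x) false
    some (v1 == v1s && v2 == v2s)
  else
    none

-- ===== PORT B =====
-- one pass; le / lo hold the last even / last odd value seen so far (None = not seen)
def semiAux (le lo : Option Int) : List Int → Bool
  | [] => true
  | x :: xs =>
    if PySem.Int.mod x 2 == 0 then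
      match le with
      | some e => if x < e then false else semiAux (some x) lo xs
      | none => semiAux (some x) lo xs
    else
      match lo with
      | some o => if x < o then false else semiAux le (some x) xs
      | none => semiAux le (some x) xs

def semiordenat_alt (v : List Int) : Option Bool :=
  if v = [] then none else some (semiAux none none v)

-- ===== PRECONDITION & SPEC =====
def Spec_semiordenat (v : List Int) (out : Option Bool) : Prop := out = semiordenat_alt v
instance (v : List Int) (out : Option Bool) : Decidable (Spec_semiordenat v out) := by unfold Spec_semiordenat; infer_instance

-- ===== CLAIM (what is proved, stated in full; the proofs are below) =====
def Claim_equal_semiordenat : Prop := ∀ (v : List Int), Dom_semiordenat v → Spec_semiordenat v (semiordenat v)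

-- ===== LEMMAS AND PROOFS =====

-- A's partition loop produces the two filters
lemma semi_foldl_partition (v : List Int) (a b : List Int) :
    v.foldl
      (fun (acc : List Int × List Int) i =>
        if PySem.Int.mod i 2 == 0 then (acc.1 ++ [i], acc.2) else (acc.1, acc.2 ++ [i]))
      (a, b)
    = (a ++ v.filter (fun i => PySem.Int.mod i 2 == 0),
       b ++ v.filter (fun i => !(PySem.Int.mod i 2 == 0))) := by
  induction v generalizing a b with
  | nil => simp
  | cons x xs ih =>
    simp only [List.foldl_cons, List.filter_cons]
    cases hb : (PySem.Int.mod x 2 == 0) with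
    | true =>
      simp only [Bool.not_true, reduceIte]
      rw [ih]; simp
    | false =>
      simp only [Bool.not_false, reduceIte]
      rw [ih]; simp

-- a list equals its Python sort iff it is nondecreasing
lemma semi_eq_sorted_iff (l : List Int) :
    (l = PySem.List.sorted l (fun x => x) false) ↔ l.Pairwise (· ≤ ·) := by
  constructor
  · intro h
    have hp := PySem.List.sorted_pairwise (xs := l) (key := fun x => x)
    rw [← h] at hp
    simpa using hp
  · intro h
    exact (PySem.List.sorted_eq_self_of_pairwise l (fun x => x) (by simpa using h)).symm

-- B's scan checks exactly that the two filtered subsequences are nondecreasing chains,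
-- with the tracked last-values prepended
lemma semiAux_spec (xs : List Int) : ∀ (le lo : Option Int),
    semiAux le lo xs
    = (decide (List.IsChain (· ≤ ·) (le.toList ++ xs.filter (fun i => PySem.Int.mod i 2 == 0)))
       && decide (List.IsChain (· ≤ ·) (lo.toList ++ xs.filter (fun i => !(PySem.Int.mod i 2 == 0))))) := by
  induction xs with
  | nil => intro le lo; cases le <;> cases lo <;> simp [semiAux]
  | cons x xs ih =>
    intro le lo
    simp only [semiAux, List.filter_cons]
    cases hb : (PySem.Int.mod x 2 == 0) with
    | true =>
      simp only [Bool.not_true, reduceIte]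
      cases le with
      | none => rw [ih (some x) lo]; simp
      | some e =>
        by_cases hxe : x < e
        · have hex : ¬ e ≤ x := not_le.mpr hxe
          simp [hxe, List.isChain_cons_cons, hex]
        · have hex : e ≤ x := not_lt.mp hxe
          dsimp only
          rw [if_neg hxe, ih (some x) lo]
          simp [List.isChain_cons_cons, hex]
    | false =>
      simp only [Bool.not_false, reduceIte]
      cases lo with
      | none => rw [ih le (some x)]; simp
      | some o =>
        by_cases hxo : x < o
        · have hox : ¬ o ≤ x := not_le.mpr hxo
          simp [hxo, List.isChain_cons_cons, hox]
        · have hox : o ≤ x := not_lt.mp hxo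
          dsimp only
          rw [if_neg hxo, ih le (some x)]
          simp [List.isChain_cons_cons, hox]

-- ===== VERDICT (by name: the statement is the Claim_ definition above) =====
theorem semiordenat_spec : Claim_equal_semiordenat := by
  intro v _
  unfold Spec_semiordenat semiordenat semiordenat_alt
  rcases v with _ | ⟨x, xs⟩
  · simp
  · rw [if_pos (by simp), if_neg (by simp)]
    rw [semi_foldl_partition, semiAux_spec]
    simp only [List.nil_append, Option.toList_none]
    congr 1
    have h1 := (semi_eq_sorted_iff ((x :: xs).filter (fun i => PySem.Int.mod i 2 == 0))).trans
      List.isChain_iff_pairwise.symm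
    have h2 := (semi_eq_sorted_iff ((x :: xs).filter (fun i => !(PySem.Int.mod i 2 == 0)))).trans
      List.isChain_iff_pairwise.symm
    rw [Bool.eq_iff_iff]
    simp only [Bool.and_eq_true, beq_iff_eq, decide_eq_true_eq]
    exact and_congr h1 h2
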